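/- GENERATED by mk_final_copies.py from the proof of the farm's unit `stb_vorbis_get_frame_float.4` (farm:stb_vorbis_get_frame_float.4.1: Lemmas.lean) as the
   re-elaboration sweep compiled it — do not edit. -/
import Asan.CheckWalk
import Vorbis.Spec.Units.stb_vorbis_get_frame_float_4

/- LEMMAS OF THE UNIT stb_vorbis_get_frame_float.4 (one round of the loop `for (i = 0; i < f->channels; ++i) f->outputs[i] =
   f->channel_buffers[i] + left;`, 1197F5H … 119804H + 1197B7H … 1197F1H). The round stores a dead return address below the steady
   stack pointer (the three check calls) and, in the body, the pointer `outputs[i]`. Everything the assertions `AtLoop` / `AtStores`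
   carry is transported over `Mem.SameExcept [⟨R − 192, R − 184⟩, ⟨lo, hi⟩]` with `[lo, hi) ⊆ [f + 1000, f + 1128)` = `outputs[]`:
   `seg4_read_stack` / `seg4_read_obj` (the reads), `seg4_gbody` (the body facts `GBody`), `seg4_fields` (the scalar fields and the
   two pointer arrays); `seg4_chan_read`, `seg4_addr_cb`, `seg4_addr_out`, `seg4_value` are the arithmetic of the round. -/
open X86 X86.User Asan Vorbis Vorbis.Spec

set_option maxRecDepth 4000
set_option maxHeartbeats 4000000

namespace Vorbis.Spec.stb_vorbis_get_frame_float_4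

/-- **`f->channels` as the dword the code loads** (`mov ebp, [rbx+4]`): with HD1 (`1 ≤ channels ≤ 16`) the unsigned reading of the
field is the ghost `ch` itself. -/
theorem seg4_chan_read {mem : Mem} {f ch : Nat} (hchan : stb_vorbis.channels mem f = (ch : Int))
    (hHD1 : 1 ≤ stb_vorbis.channels mem f ∧ stb_vorbis.channels mem f ≤ 16) :
    mem.readLE (addr f + 4) 4 = ch ∧ 1 ≤ ch ∧ ch ≤ 16 := by
  rw [hchan] at hHD1
  simp only [vacc, voff] at hchan
  unfold Mem.i32 Mem.u32 at hchan
  rw [← addr_add_lit] at hchan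
  have hlt : mem.readLE (addr f + 4) 4 < 2 ^ 32 := X86.User.Mem.readLE_lt' _ _ 4
  have hc := sint32_cases (mem.readLE (addr f + 4) 4)
  omega

/-- **A read of the own frame above the steady stack pointer** (`[R − 184, R + 8)`: the spills, the protected frame's objects, the
saved registers, the return address) goes through the stores of one round. -/
theorem seg4_read_stack {R f lo hi : Nat} {m m' : Mem}
    (hs : Mem.SameExcept [⟨R - 192, R - 184⟩, ⟨lo, hi⟩] m m') (a : Word) (k : Nat)
    (ha : R - 184 ≤ a.toNat) (hk : a.toNat + k ≤ R + 8) (hR : 0x700000 + 4240 ≤ R) (hR2 : R + 8 ≤ 0x800000)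
    (hlo : f + 1000 ≤ lo) (hhi : hi ≤ f + 1128) (hf : f + 1808 ≤ 0x700000 ∨ 0x800000 ≤ f) :
    m'.readLE a k = m.readLE a k := by
  apply hs.readLE a k (by omega)
  intro w hw
  simp only [List.mem_cons, List.not_mem_nil, or_false] at hw
  rcases hw with rfl | rfl
  · simp only []
    omega
  · simp only []
    omega

/-- **A read of `*f` off the written part of `outputs[]`** goes through the stores of one round. -/
theorem seg4_read_obj {R f lo hi : Nat} {m m' : Mem}
    (hs : Mem.SameExcept [⟨R - 192, R - 184⟩, ⟨lo, hi⟩] m m') (a k : Nat)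
    (ha : f ≤ a) (hk : a + k ≤ f + 1808) (hmiss : a + k ≤ lo ∨ hi ≤ a) (hR : 0x700000 + 4240 ≤ R) (hR2 : R + 8 ≤ 0x800000)
    (hf : f + 1808 ≤ 0x700000 ∨ 0x800000 ≤ f) (hf2 : f + 1808 ≤ 0xC00000) :
    m'.readLE (addr a) k = m.readLE (addr a) k := by
  have ea : (addr a).toNat = a := toNat_addr a (by omega)
  apply hs.readLE (addr a) k (by omega)
  intro w hw
  simp only [List.mem_cons, List.not_mem_nil, or_false] at hw
  rcases hw with rfl | rfl
  · simp only []
    omega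
  · simp only []
    omega

/-- The address of `channel_buffers[i]` as the walker writes it (`lea r15, [r12+6CH]` … `[rbx + r15*8 + 8]`): `f + 872 + 8 i`. -/
theorem seg4_addr_cb (f i : Nat) (hf : f + 1808 ≤ 0xC00000) (hi : i < 16) :
    addr f + (UInt64.ofNat i + 108) * 8 + 8 = addr (f + 872 + 8 * i) := by
  unfold addr
  apply UInt64.toNat_inj.mp
  u_omega

/-- The address of `outputs[i]` as the walker writes it (`lea r15, [r12+7CH]` … `[rbx + r15*8 + 8]`): `f + 1000 + 8 i`. -/
theorem seg4_addr_out (f i : Nat) (hf : f + 1808 ≤ 0xC00000) (hi : i < 16) :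
    addr f + (UInt64.ofNat i + 124) * 8 + 8 = addr (f + 1000 + 8 * i) := by
  unfold addr
  apply UInt64.toNat_inj.mp
  u_omega

/-- **The stored pointer** `channel_buffers[i] + left` (`movsxd rbp, [rsp+60H] ; shl rbp, 2 ; add rbp, [..]`): no wrap-around, since
the buffer is an allocated block (below C00000H) and `left` a non-negative `int`. -/
theorem seg4_value (cb left : Nat) (hcb : cb ≤ 0xC00000) (hl : left < 2 ^ 31) :
    (Word.ofBV (BitVec.signExtend 64 (BitVec.ofNat 32 left)) <<< 2 + UInt64.ofNat cb).toNat = cb + 4 * left := by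
  have e := cnt32_sext_bv_shl2 left hl
  rw [UInt64.toNat_add, e, UInt64.toNat_ofNat']
  omega

/-- **The body facts `GBody` over the stores of one round**: a dead return address below the steady stack pointer and (in the
loop's body) a pointer of `outputs[]`. The slots by `seg4_read_stack`, the footprint by `SameExcept.step_same` (`outputs[]` lies in
the arena's window: `gff_obj_where`), the shadow layer by `ShadowInv.untouched`, the decode-time invariant by `decodeInv_stores`. -/
theorem seg4_gbody {others : List Obj} {frames : List (Nat × FrameLayout)} {len : Nat} {A : Arena} {stored room : Int}
    {ysz : Nat → Nat} {u₀ u : State} {ret : Word} {f lo hi : Nat} {v s : State}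
    (hb : stb_vorbis_get_frame_float.GBody others frames len A stored room ysz u₀ u ret f v)
    (hs : Mem.SameExcept [⟨(u.reg .rsp).toNat - 192, (u.reg .rsp).toNat - 184⟩, ⟨lo, hi⟩] v.mem s.mem)
    (hlo : f + 1000 ≤ lo) (hhi : hi ≤ f + 1128)
    (hrsp : s.reg .rsp = u.reg .rsp - 184) (hr14 : s.reg .r14 = v.reg .r14) (hrbx : s.reg .rbx = v.reg .rbx)
    (hcode : (conv u₀).code.In s.mem) (hinv : (conv u₀).inv s) :
    stb_vorbis_get_frame_float.GBody others frames len A stored room ysz u₀ u ret f s := by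
  obtain ⟨hfrm, j_rbx, hsch, hsou⟩ := hb
  obtain ⟨he0, hpre0, hf, j_rsp, j_r14, hs15, hs14, hs13, hs12, hsbp, hsbx, hs0, hsame, j_code, j_inv, hshadow, hdi⟩ := hfrm
  have he := he0
  u_entry he
  simp only [vspec, Vorbis.conv_stackLo, Vorbis.conv_stackHi] at he_room he_top
  have hwf := stb_vorbis_get_frame_float.gff_obj_where hdi
  obtain ⟨hw1, hw2, hw3, hw4, hw5⟩ := hwf
  -- a stack slot `[R − k, R − k + n)` of the own frame is read through the round's stores
  have rd : ∀ (a : Word) (k : Nat), (u.reg .rsp).toNat - 184 ≤ a.toNat → a.toNat + k ≤ (u.reg .rsp).toNat + 8 →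
      s.mem.readLE a k = v.mem.readLE a k := by
    intro a k h1 h2
    exact seg4_read_stack hs a k h1 h2 he_room he_top hlo hhi hw3
  -- no store went to the shadow
  have hun : ShadowUntouched v.mem s.mem := by
    apply hs.eqOn
    intro w hw
    simp only [List.mem_cons, List.not_mem_nil, or_false] at hw
    rcases hw with rfl | rfl
    · simp only []
      omega
    · simp only []
      omega
  have hshadow' : ShadowInv others (stb_vorbis_get_frame_float.ownFrames u frames) ((u.reg .rsp).toNat - 184) s.mem :=
    hshadow.untouched hun
  have hdi' : DecodeInv others (stb_vorbis_get_frame_float.ownFrames u frames) len A stored room ysz s.mem f := by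
    refine stb_vorbis_get_frame_float.decodeInv_stores hdi hshadow' hs ?_
    intro w hw
    simp only [List.mem_cons, List.not_mem_nil, or_false] at hw
    rcases hw with rfl | rfl
    · left
      simp only []
      omega
    · right
      left
      simp only []
      omega
  have hsame' : Mem.SameExcept [⟨(u.reg .rsp).toNat - 4240, (u.reg .rsp).toNat⟩, ⟨A.B, A.B + A.L⟩, ⟨0xC00000, 0xE00000⟩,
      ⟨(u.reg .rsi).toNat, (u.reg .rsi).toNat + 4⟩, ⟨(u.reg .rdx).toNat, (u.reg .rdx).toNat + 8⟩] u.mem s.mem := by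
    refine hsame.step_same hs ?_
    intro w hw a h1 h2
    simp only [List.mem_cons, List.not_mem_nil, or_false] at hw
    rcases hw with rfl | rfl
    · refine ⟨⟨(u.reg .rsp).toNat - 4240, (u.reg .rsp).toNat⟩, List.mem_cons_self, ?_, ?_⟩
      · simp only [] at h1 h2 ⊢
        omega
      · simp only [] at h1 h2 ⊢
        omega
    · refine ⟨⟨A.B, A.B + A.L⟩, List.mem_cons_of_mem _ List.mem_cons_self, ?_, ?_⟩
      · simp only [] at h1 h2 ⊢
        omega
      · simp only [] at h1 h2 ⊢
        omega
  have e8 : (u.reg .rsp - 8).toNat = (u.reg .rsp).toNat - 8 := by u_omega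
  have e16 : (u.reg .rsp - 16).toNat = (u.reg .rsp).toNat - 16 := by u_omega
  have e24 : (u.reg .rsp - 24).toNat = (u.reg .rsp).toNat - 24 := by u_omega
  have e32 : (u.reg .rsp - 32).toNat = (u.reg .rsp).toNat - 32 := by u_omega
  have e40 : (u.reg .rsp - 40).toNat = (u.reg .rsp).toNat - 40 := by u_omega
  have e48 : (u.reg .rsp - 48).toNat = (u.reg .rsp).toNat - 48 := by u_omega
  have e176 : (u.reg .rsp - 176).toNat = (u.reg .rsp).toNat - 176 := by u_omega
  have e168 : (u.reg .rsp - 168).toNat = (u.reg .rsp).toNat - 168 := by u_omega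
  have hfrm' : stb_vorbis_get_frame_float.GFrame others frames len A stored room ysz u₀ u ret f s := by
    refine ⟨he0, hpre0, hf, hrsp, ?_, ?_, ?_, ?_, ?_, ?_, ?_, ?_, hsame', hcode, hinv, hshadow', hdi'⟩
    · rw [hr14]
      exact j_r14
    · rw [rd _ 8 (by omega) (by omega)]
      exact hs15
    · rw [rd _ 8 (by omega) (by omega)]
      exact hs14
    · rw [rd _ 8 (by omega) (by omega)]
      exact hs13
    · rw [rd _ 8 (by omega) (by omega)]
      exact hs12
    · rw [rd _ 8 (by omega) (by omega)]
      exact hsbp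
    · rw [rd _ 8 (by omega) (by omega)]
      exact hsbx
    · rw [rd _ 8 (by omega) (by omega)]
      exact hs0
  refine ⟨hfrm', ?_, ?_, ?_⟩
  · rw [hrbx]
    exact j_rbx
  · rw [rd _ 8 (by omega) (by omega)]
    exact hsch
  · rw [rd _ 8 (by omega) (by omega)]
    exact hsou

/-- **The fields of `*f` and the locals that `AtLoop` / `AtStores` speak of, over the stores of one round**: `channels`,
`blocksize_1`, `channel_buffers[·]` lie below `outputs[]`; the three locals lie in the own frame; `outputs[c]` is kept when the
written window misses it. -/
theorem seg4_fields {others : List Obj} {frames : List (Nat × FrameLayout)} {len : Nat} {A : Arena} {stored room : Int}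
    {ysz : Nat → Nat} {u₀ u : State} {ret : Word} {f lo hi : Nat} {v : State} {m' : Mem}
    (hb : stb_vorbis_get_frame_float.GBody others frames len A stored room ysz u₀ u ret f v)
    (hs : Mem.SameExcept [⟨(u.reg .rsp).toNat - 192, (u.reg .rsp).toNat - 184⟩, ⟨lo, hi⟩] v.mem m')
    (hlo : f + 1000 ≤ lo) (hhi : hi ≤ f + 1128) :
    stb_vorbis.channels m' f = stb_vorbis.channels v.mem f ∧
    stb_vorbis.blocksize_1 m' f = stb_vorbis.blocksize_1 v.mem f ∧
    m'.readLE (u.reg .rsp - 156) 4 = v.mem.readLE (u.reg .rsp - 156) 4 ∧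
    m'.readLE (u.reg .rsp - 120) 4 = v.mem.readLE (u.reg .rsp - 120) 4 ∧
    m'.readLE (u.reg .rsp - 88) 4 = v.mem.readLE (u.reg .rsp - 88) 4 ∧
    (∀ c : Nat, c < 16 → stb_vorbis.channel_buffers m' f c = stb_vorbis.channel_buffers v.mem f c) ∧
    (∀ c : Nat, c < 16 → (f + 1008 + 8 * c ≤ lo ∨ hi ≤ f + 1000 + 8 * c) →
      stb_vorbis.outputs m' f c = stb_vorbis.outputs v.mem f c) := by
  have he := hb.frame.entry
  u_entry he
  simp only [vspec, Vorbis.conv_stackLo, Vorbis.conv_stackHi] at he_room he_top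
  obtain ⟨hw1, hw2, hw3, hw4, hw5⟩ := stb_vorbis_get_frame_float.gff_obj_where hb.frame.dinv
  have e156 : (u.reg .rsp - 156).toNat = (u.reg .rsp).toNat - 156 := by u_omega
  have e120 : (u.reg .rsp - 120).toNat = (u.reg .rsp).toNat - 120 := by u_omega
  have e88 : (u.reg .rsp - 88).toNat = (u.reg .rsp).toNat - 88 := by u_omega
  refine ⟨?_, ?_, ?_, ?_, ?_, ?_, ?_⟩
  · simp only [vacc, voff]
    unfold Mem.i32 Mem.u32
    rw [seg4_read_obj hs (f + 4) 4 (by omega) (by omega) (by omega) he_room he_top hw3 hw2]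
  · simp only [vacc, voff]
    unfold Mem.i32 Mem.u32
    rw [seg4_read_obj hs (f + 156) 4 (by omega) (by omega) (by omega) he_room he_top hw3 hw2]
  · exact seg4_read_stack hs _ 4 (by omega) (by omega) he_room he_top hlo hhi hw3
  · exact seg4_read_stack hs _ 4 (by omega) (by omega) he_room he_top hlo hhi hw3
  · exact seg4_read_stack hs _ 4 (by omega) (by omega) he_room he_top hlo hhi hw3
  · intro c hc
    simp only [vacc, voff]
    unfold Mem.u64
    exact seg4_read_obj hs (f + 872 + 8 * c) 8 (by omega) (by omega) (by omega) he_room he_top hw3 hw2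
  · intro c hc hmiss
    simp only [vacc, voff]
    unfold Mem.u64
    exact seg4_read_obj hs (f + 1000 + 8 * c) 8 (by omega) (by omega) (by omega) he_room he_top hw3 hw2

/-- **The pointer just stored is read back**: `outputs[i]` in the memory after the store at 1197ECH is `channel_buffers[i] + 4·left`
(the loaded `channel_buffers[i]` is a block's base: below C00000H, so the 64-bit sum does not wrap). `m1` is the memory the store
went to (the entry memory of the round with a dead return address), `m` the memory the walker read `channel_buffers[i]` from. -/
theorem seg4_stored (m m1 : Mem) (f i left : Nat) (hl : left < 2 ^ 31)
    (hcb : stb_vorbis.channel_buffers m f i ≤ 0xC00000) :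
    stb_vorbis.outputs (m1.writeLE (addr (f + 1000 + 8 * i)) 8
      (Word.ofBV (BitVec.signExtend 64 (BitVec.ofNat 32 left)) <<< 2 +
        UInt64.ofNat (m.readLE (addr (f + 872 + 8 * i)) 8)).toNat) f i =
      stb_vorbis.channel_buffers m f i + 4 * left := by
  simp only [vacc, voff] at hcb ⊢
  unfold Mem.u64 at hcb ⊢
  have e : (256 : Nat) ^ 8 = 18446744073709551616 := by decide
  rw [Mem.readLE_writeLE_same _ _ _ _ (by decide), seg4_value _ _ hcb hl, e]
  omega

end Vorbis.Spec.stb_vorbis_get_frame_float_4
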